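-- pv_equiv track=rewrite | github.com/Surath83/LeetCode | 4199-minimum-prefix-removal-to-make-array-strictly-increasing/minimum-prefix-removal-to-make-array-strictly-increasing.py | minimumPrefixLength
-- ===== SOURCE A (Python) =====
-- from typing import List
--
-- def minimumPrefixLength(nums: List[int]) -> int:
--     l = len(nums)
--     violation=0
--     for i in range(l-2,-1,-1):
--         if(nums[i]<nums[i+1]):
--             continue
--         elif(nums[i]>=nums[i+1]):
--             violation=i+1
--             break
--     return violation
-- ===== SOURCE B (Python) =====
-- from typing import List
--
-- def minimumPrefixLength(nums: List[int]) -> int: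
--     # Partition nums into maximal strictly increasing runs; the answer is
--     # len(nums) minus the length of the last run (the longest increasing suffix).
--     runs = []
--     cur = []
--     for x in nums:
--         if cur and cur[-1] >= x:
--             runs.append(cur)
--             cur = [x]
--         else:
--             cur.append(x)
--     if cur:
--         runs.append(cur)
--     if not runs:
--         return 0
--     return len(nums) - len(runs[-1])
-- ===== Notes on version B (the rewrite author's own statement) =====
-- stated objective: alternative
-- what changed: Instead of scanning indices right-to-left with an early break for the last descent, B partitions the list into maximal strictly increasing runs and returns len(nums) minus the length of the last run (the longest strictly increasing suffix).
import Mathlib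
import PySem

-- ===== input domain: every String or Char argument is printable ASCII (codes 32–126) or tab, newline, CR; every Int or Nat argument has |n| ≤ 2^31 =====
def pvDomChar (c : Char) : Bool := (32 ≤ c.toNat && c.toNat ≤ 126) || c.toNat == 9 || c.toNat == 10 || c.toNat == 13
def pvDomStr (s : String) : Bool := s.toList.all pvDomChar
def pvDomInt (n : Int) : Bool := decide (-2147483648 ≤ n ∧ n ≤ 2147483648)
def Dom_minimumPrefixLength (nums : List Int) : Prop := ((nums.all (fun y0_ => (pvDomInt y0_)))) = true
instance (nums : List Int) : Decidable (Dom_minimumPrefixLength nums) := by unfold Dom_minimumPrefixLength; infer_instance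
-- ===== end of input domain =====

-- B replaces A's right-to-left index scan with early break by partitioning the list
-- into maximal strictly increasing runs and returning len(nums) - len(last run).
-- ===== PORT A =====
-- loop `for i in range(l-2,-1,-1)` with break; k = number of remaining iterations, current index = k-1
def pvGoA (nums : List Int) : Nat → Int
  | 0 => 0
  | (k+1) =>
      if nums.getD k 0 < nums.getD (k+1) 0 then pvGoA nums k
      else if nums.getD k 0 ≥ nums.getD (k+1) 0 then ((k : Int) + 1)
      else pvGoA nums k

def minimumPrefixLength (nums : List Int) : Int :=
  pvGoA nums (nums.length - 1)

-- ===== PORT B =====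
-- one loop step of Source B: extend the current strictly increasing run or close it
def pvStepB (s : List (List Int) × List Int) (x : Int) : List (List Int) × List Int :=
  match s with
  | (runs, cur) =>
      if cur ≠ [] ∧ (cur.getLast?.getD 0) ≥ x then (runs ++ [cur], [x])
      else (runs, cur ++ [x])

def minimumPrefixLength_alt (nums : List Int) : Int :=
  let s := nums.foldl pvStepB ([], [])
  let runs := if s.2 ≠ [] then s.1 ++ [s.2] else s.1
  match runs with
  | [] => 0
  | _ => (nums.length : Int) - (((runs.getLast?.getD []).length : Nat) : Int)

-- ===== PRECONDITION & SPEC =====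
def Spec_minimumPrefixLength (nums : List Int) (out : Int) : Prop := out = minimumPrefixLength_alt nums
instance (nums : List Int) (out : Int) : Decidable (Spec_minimumPrefixLength nums out) := by unfold Spec_minimumPrefixLength; infer_instance

-- ===== CLAIM (what is proved, stated in full; the proofs are below) =====
def Claim_equal_minimumPrefixLength : Prop := ∀ (nums : List Int), Dom_minimumPrefixLength nums → Spec_minimumPrefixLength nums (minimumPrefixLength nums)

-- ===== LEMMAS AND PROOFS =====

-- pvGoA only reads indices ≤ k, so appending an element beyond them changes nothing
theorem pvGoA_append (l : List Int) (x : Int) (k : Nat) (hk : k < l.length) :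
    pvGoA (l ++ [x]) k = pvGoA l k := by
  induction k with
  | zero => simp [pvGoA]
  | succ k ih =>
      have hklt : k < l.length := Nat.lt_of_succ_lt hk
      have h1 : (l ++ [x]).getD k 0 = l.getD k 0 := List.getD_append _ _ _ _ hklt
      have h2 : (l ++ [x]).getD (k+1) 0 = l.getD (k+1) 0 := List.getD_append _ _ _ _ hk
      simp only [pvGoA, h1, h2]
      split_ifs with h h'
      · exact ih hklt
      · rfl
      · exact ih hklt

-- A's recurrence on appending one element: break at the new last pair, else recurse
theorem pvGoA_snoc (l : List Int) (x : Int) (hl : l ≠ []) :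
    pvGoA (l ++ [x]) ((l ++ [x]).length - 1)
      = if l.getLast?.getD 0 ≥ x then (l.length : Int)
        else pvGoA l (l.length - 1) := by
  have hlen : (l ++ [x]).length - 1 = (l.length - 1) + 1 := by
    have := List.length_pos_of_ne_nil hl
    simp [List.length_append]; omega
  have hpos : 0 < l.length := List.length_pos_of_ne_nil hl
  have hidx : l.length - 1 < l.length := by omega
  have hgetk : (l ++ [x]).getD (l.length - 1) 0 = l.getLast?.getD 0 := by
    rw [List.getD_append _ _ _ _ hidx]
    rw [List.getLast?_eq_getElem?]
    simp [List.getD_eq_getElem?_getD]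
  have hgetk1 : (l ++ [x]).getD ((l.length - 1) + 1) 0 = x := by
    have : (l.length - 1) + 1 = l.length := by omega
    rw [this]
    simp [List.getD_eq_getElem?_getD]
  rw [hlen]
  simp only [pvGoA, hgetk, hgetk1]
  have hrec : pvGoA (l ++ [x]) (l.length - 1) = pvGoA l (l.length - 1) :=
    pvGoA_append l x _ hidx
  by_cases h : l.getLast?.getD 0 ≥ x
  · rw [if_neg (not_lt.mpr h), if_pos h, if_pos h]
    have : ((l.length - 1 : Nat) : Int) + 1 = (l.length : Int) := by omega
    rw [this]
  · rw [if_pos (lt_of_not_ge h), if_neg h, hrec]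

-- Invariant of Source B's loop over a nonempty prefix l:
--   runs ++ [cur] partitions l (so lengths add up), cur carries l's last element,
--   and the closed part's length is exactly A's answer on l.
theorem stepB_invariant (l : List Int) (hl : l ≠ []) :
    (l.foldl pvStepB ([], [])).2 ≠ [] ∧
    (l.foldl pvStepB ([], [])).2.getLast? = l.getLast? ∧
    ((l.foldl pvStepB ([], [])).1.flatten.length + (l.foldl pvStepB ([], [])).2.length = l.length) ∧
    pvGoA l (l.length - 1) = ((l.foldl pvStepB ([], [])).1.flatten.length : Int) := by
  induction l using List.reverseRecOn with
  | nil => exact absurd rfl hl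
  | append_singleton l x ih =>
      rcases eq_or_ne l [] with rfl | hne
      · refine ⟨by simp [pvStepB], by simp [pvStepB], by simp [pvStepB], ?_⟩
        simp [pvStepB, pvGoA]
      · obtain ⟨hcur, hlast, hlen, hval⟩ := ih hne
        have hfold : (l ++ [x]).foldl pvStepB ([], []) = pvStepB (l.foldl pvStepB ([], [])) x := by
          rw [List.foldl_append]; rfl
        set s := l.foldl pvStepB ([], []) with hs
        have hsnoc := pvGoA_snoc l x hne
        have hlastD : s.2.getLast?.getD 0 = l.getLast?.getD 0 := by rw [hlast]
        by_cases h : l.getLast?.getD 0 ≥ x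
        · have hcond : s.2 ≠ [] ∧ (s.2.getLast?.getD 0) ≥ x := ⟨hcur, by rw [hlastD]; exact h⟩
          have hstep : pvStepB s x = (s.1 ++ [s.2], [x]) := by
            rw [pvStepB.eq_def]; simp only [if_pos hcond]
          refine ⟨?_, ?_, ?_, ?_⟩ <;> rw [hfold, hstep]
          · simp
          · simp
          · simp only [List.flatten_append, List.length_append, List.flatten_cons,
              List.flatten_nil, List.append_nil, List.length_cons, List.length_nil]
            omega
          · rw [hsnoc, if_pos h]
            simp only [List.flatten_append, List.length_append, List.flatten_cons,
              List.flatten_nil, List.append_nil]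
            omega
        · have hcond : ¬ (s.2 ≠ [] ∧ (s.2.getLast?.getD 0) ≥ x) := by
            rw [hlastD]; tauto
          have hstep : pvStepB s x = (s.1, s.2 ++ [x]) := by
            rw [pvStepB.eq_def]; simp only [if_neg hcond]
          refine ⟨?_, ?_, ?_, ?_⟩ <;> rw [hfold, hstep]
          · simp
          · simp
          · simp only [List.length_append, List.length_cons, List.length_nil]; omega
          · rw [hsnoc, if_neg h]; exact hval

-- ===== VERDICT (by name: the statement is the Claim_ definition above) =====
theorem minimumPrefixLength_spec : Claim_equal_minimumPrefixLength := by
  intro nums _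
  unfold Spec_minimumPrefixLength minimumPrefixLength minimumPrefixLength_alt
  rcases eq_or_ne nums [] with rfl | hne
  · simp [pvGoA]
  · obtain ⟨hcur, _, hlen, hval⟩ := stepB_invariant nums hne
    set s := nums.foldl pvStepB ([], []) with hs
    simp only [if_pos hcur]
    rcases hrc : s.1 ++ [s.2] with _ | ⟨r, rs⟩
    · exact absurd hrc (by simp)
    · have h2 : ((r :: rs).getLast?.getD []) = s.2 := by rw [← hrc]; simp
      simp only [h2, hval]
      omega
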